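-- pv_equiv track=rewrite | github.com/montimaj/Python_Practice | Orthopetra/orthopetra.py | min_max_kv
-- ===== SOURCE A (Python) =====
-- def min_max_kv(dictionary):
--     min=list(dictionary.values())[0]
--     max=min
--     for key, value in dictionary.items():
--         if value < min:
--             min = value
--         if value > max:
--             max = value
--     min_kv=[]
--     max_kv=[]
--     for key, value in dictionary.items():
--         if value==min:
--             min_kv.append((key, value))
--         if value==max:
--             max_kv.append((key, value))
--     return min_kv, max_kv
-- ===== SOURCE B (Python) =====
-- def min_max_kv(dictionary):
--     items = list(dictionary.items())
--     k0, v0 = items[0]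
--     mn = mx = v0
--     min_kv = [(k0, v0)]
--     max_kv = [(k0, v0)]
--     for k, v in items[1:]:
--         if v < mn:
--             mn = v
--             min_kv = [(k, v)]
--         elif v == mn:
--             min_kv.append((k, v))
--         if v > mx:
--             mx = v
--             max_kv = [(k, v)]
--         elif v == mx:
--             max_kv.append((k, v))
--     return min_kv, max_kv
-- ===== Notes on version B (the rewrite author's own statement) =====
-- stated objective: alternative
-- what changed: Single pass that seeds min/max and both candidate lists from the first item and resets/extends the lists on the fly, instead of A's two full passes (one to find min/max, one to collect pairs).
import Mathlib
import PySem

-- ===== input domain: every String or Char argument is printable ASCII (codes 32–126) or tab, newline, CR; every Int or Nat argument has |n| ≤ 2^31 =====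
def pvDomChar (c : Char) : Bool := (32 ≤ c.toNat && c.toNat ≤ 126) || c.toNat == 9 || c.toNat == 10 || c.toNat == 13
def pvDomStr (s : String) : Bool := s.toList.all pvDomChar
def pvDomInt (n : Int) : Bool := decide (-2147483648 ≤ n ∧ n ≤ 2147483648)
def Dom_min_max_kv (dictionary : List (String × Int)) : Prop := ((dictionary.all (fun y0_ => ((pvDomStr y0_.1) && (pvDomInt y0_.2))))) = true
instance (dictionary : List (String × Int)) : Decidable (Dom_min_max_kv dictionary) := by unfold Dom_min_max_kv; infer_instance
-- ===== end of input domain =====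

-- B does the same job in ONE pass (seeding min/max and both candidate lists from the first
-- item) instead of A's two passes; equivalence is about the return value only.

-- ===== PORT A =====
def min_max_kv (dictionary : List (String × Int)) : (List (String × Int)) × (List (String × Int)) :=
  match (dictionary.map Prod.snd).head? with
  | none => ([], [])      -- Python raises IndexError here; excluded by Pre_
  | some v0 =>
    -- first loop: track running min and max over all items
    let p := dictionary.foldl
      (fun (p : Int × Int) kv =>
        (if kv.2 < p.1 then kv.2 else p.1, if kv.2 > p.2 then kv.2 else p.2))
      (v0, v0)
    -- second loop: collect the pairs equal to min / to max
    dictionary.foldl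
      (fun (q : List (String × Int) × List (String × Int)) kv =>
        (if kv.2 = p.1 then q.1 ++ [kv] else q.1,
         if kv.2 = p.2 then q.2 ++ [kv] else q.2))
      ([], [])

-- ===== PORT B =====
-- one step of B's single loop: update (mn, mx, min_kv, max_kv) for one item
def bStep (s : Int × Int × List (String × Int) × List (String × Int)) (kv : String × Int) :
    Int × Int × List (String × Int) × List (String × Int) :=
  let (mn, mx, mkv, xkv) := s
  let (mn, mkv) :=
    if kv.2 < mn then (kv.2, [kv])
    else if kv.2 = mn then (mn, mkv ++ [kv])
    else (mn, mkv)
  let (mx, xkv) :=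
    if kv.2 > mx then (kv.2, [kv])
    else if kv.2 = mx then (mx, xkv ++ [kv])
    else (mx, xkv)
  (mn, mx, mkv, xkv)

def min_max_kv_alt (dictionary : List (String × Int)) : (List (String × Int)) × (List (String × Int)) :=
  match dictionary with
  | [] => ([], [])        -- Python raises IndexError here; excluded by Pre_
  | kv0 :: rest =>
    let s := rest.foldl bStep (kv0.2, kv0.2, [kv0], [kv0])
    (s.2.2.1, s.2.2.2)

-- ===== PRECONDITION & SPEC =====
-- Pre_ excludes only the empty dict, on which A (and B) raises IndexError.
def Pre_min_max_kv (dictionary : List (String × Int)) : Prop := dictionary ≠ []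
instance (dictionary : List (String × Int)) : Decidable (Pre_min_max_kv dictionary) := by unfold Pre_min_max_kv; infer_instance
def pvWitness_min_max_kv : (List (String × Int)) := [("a", 2), ("b", 1), ("c", 2)]

def Spec_min_max_kv (dictionary : List (String × Int)) (out : (List (String × Int)) × (List (String × Int))) : Prop := out = min_max_kv_alt dictionary
instance (dictionary : List (String × Int)) (out : (List (String × Int)) × (List (String × Int))) : Decidable (Spec_min_max_kv dictionary out) := by unfold Spec_min_max_kv; infer_instance

-- ===== CLAIM (what is proved, stated in full; the proofs are below) =====
def Claim_equal_min_max_kv : Prop := ∀ (dictionary : List (String × Int)), Dom_min_max_kv dictionary → Pre_min_max_kv dictionary → Spec_min_max_kv dictionary (min_max_kv dictionary)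

-- ===== LEMMAS AND PROOFS =====

-- the running minimum / maximum of the values, seeded with a
def pvM (l : List (String × Int)) (a : Int) : Int :=
  l.foldl (fun m kv => if kv.2 < m then kv.2 else m) a
def pvX (l : List (String × Int)) (a : Int) : Int :=
  l.foldl (fun m kv => if kv.2 > m then kv.2 else m) a

-- the min-half and max-half of bStep as independent steps
def mStep (s : Int × List (String × Int)) (kv : String × Int) : Int × List (String × Int) :=
  if kv.2 < s.1 then (kv.2, [kv]) else if kv.2 = s.1 then (s.1, s.2 ++ [kv]) else s
def xStep (s : Int × List (String × Int)) (kv : String × Int) : Int × List (String × Int) :=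
  if kv.2 > s.1 then (kv.2, [kv]) else if kv.2 = s.1 then (s.1, s.2 ++ [kv]) else s

theorem pvM_le (l : List (String × Int)) : ∀ a : Int, pvM l a ≤ a := by
  induction l with
  | nil => intro a; simp [pvM]
  | cons kv t ih =>
    intro a
    simp only [pvM, List.foldl_cons]
    by_cases h : kv.2 < a
    · simp only [if_pos h]; exact le_trans (ih kv.2) (le_of_lt h)
    · simp only [if_neg h]; exact ih a

theorem pvX_ge (l : List (String × Int)) : ∀ a : Int, a ≤ pvX l a := by
  induction l with
  | nil => intro a; simp [pvX]
  | cons kv t ih =>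
    intro a
    simp only [pvX, List.foldl_cons]
    by_cases h : kv.2 > a
    · simp only [if_pos h]; exact le_trans (le_of_lt h) (ih kv.2)
    · simp only [if_neg h]; exact ih a

theorem bStep_split (a b : Int) (m x : List (String × Int)) (kv : String × Int) :
    bStep (a, b, m, x) kv =
      ((mStep (a, m) kv).1, (xStep (b, x) kv).1, (mStep (a, m) kv).2, (xStep (b, x) kv).2) := by
  simp only [bStep, mStep, xStep]


theorem foldl_bStep_split (l : List (String × Int)) :
    ∀ (a b : Int) (m x : List (String × Int)),
    l.foldl bStep (a, b, m, x) =
      ((l.foldl mStep (a, m)).1, (l.foldl xStep (b, x)).1,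
       (l.foldl mStep (a, m)).2, (l.foldl xStep (b, x)).2) := by
  induction l with
  | nil => intro a b m x; rfl
  | cons kv t ih =>
    intro a b m x
    simp only [List.foldl_cons, bStep_split, ih]

-- invariant of the min-half of B's loop
theorem mInv (l : List (String × Int)) :
    ∀ (a : Int) (acc : List (String × Int)),
    l.foldl mStep (a, acc) =
      (pvM l a, (if pvM l a = a then acc else []) ++ l.filter (fun kv => kv.2 = pvM l a)) := by
  induction l with
  | nil => intro a acc; simp [pvM]
  | cons kv t ih =>
    intro a acc
    simp only [List.foldl_cons, mStep]
    by_cases h1 : kv.2 < a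
    · have hM : pvM (kv :: t) a = pvM t kv.2 := by simp [pvM, if_pos h1]
      have hm : ¬ pvM t kv.2 = a := by have := pvM_le t kv.2; omega
      simp only [if_pos h1, ih, hM, hm, if_false, List.filter_cons]
      by_cases he : kv.2 = pvM t kv.2
      · simp [← he]
      · simp [he, Ne.symm he]
    · by_cases h1' : kv.2 = a
      · have hM : pvM (kv :: t) a = pvM t a := by simp [pvM, if_neg h1]
        simp only [if_neg h1, if_pos h1', ih, hM, List.filter_cons]
        by_cases he : pvM t a = a
        · have hkv : kv.2 = pvM t a := by omega
          simp [he, hkv]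
        · have : ¬ kv.2 = pvM t a := by omega
          simp [he, this]
      · have hM : pvM (kv :: t) a = pvM t a := by simp [pvM, if_neg h1]
        have : ¬ kv.2 = pvM t a := by have := pvM_le t a; omega
        simp only [if_neg h1, if_neg h1', ih, hM, List.filter_cons, this, decide_false]
        simp

-- invariant of the max-half of B's loop
theorem xInv (l : List (String × Int)) :
    ∀ (a : Int) (acc : List (String × Int)),
    l.foldl xStep (a, acc) =
      (pvX l a, (if pvX l a = a then acc else []) ++ l.filter (fun kv => kv.2 = pvX l a)) := by
  induction l with
  | nil => intro a acc; simp [pvX]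
  | cons kv t ih =>
    intro a acc
    simp only [List.foldl_cons, xStep]
    by_cases h1 : kv.2 > a
    · have hX : pvX (kv :: t) a = pvX t kv.2 := by simp [pvX, if_pos h1]
      have hm : ¬ pvX t kv.2 = a := by have := pvX_ge t kv.2; omega
      simp only [if_pos h1, ih, hX, hm, if_false, List.filter_cons]
      by_cases he : kv.2 = pvX t kv.2
      · simp [← he]
      · simp [he, Ne.symm he]
    · by_cases h1' : kv.2 = a
      · have hX : pvX (kv :: t) a = pvX t a := by simp [pvX, if_neg h1]
        simp only [if_neg h1, if_pos h1', ih, hX, List.filter_cons]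
        by_cases he : pvX t a = a
        · have hkv : kv.2 = pvX t a := by omega
          simp [he, hkv]
        · have : ¬ kv.2 = pvX t a := by omega
          simp [he, this]
      · have hX : pvX (kv :: t) a = pvX t a := by simp [pvX, if_neg h1]
        have : ¬ kv.2 = pvX t a := by have := pvX_ge t a; omega
        simp only [if_neg h1, if_neg h1', ih, hX, List.filter_cons, this, decide_false]
        simp

-- ===== VERDICT (by name: the statement is the Claim_ definition above) =====
theorem min_max_kv_spec : Claim_equal_min_max_kv := by
  intro d _ hpre
  unfold Spec_min_max_kv
  match d with
  | [] => exact absurd rfl hpre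
  | kv0 :: rest =>
    have hfold1 : List.foldl (fun (p : Int × Int) (kv : String × Int) =>
        (if kv.2 < p.1 then kv.2 else p.1, if kv.2 > p.2 then kv.2 else p.2))
        (kv0.2, kv0.2) (kv0 :: rest) = (pvM rest kv0.2, pvX rest kv0.2) := by
      rw [PySem.List.foldl_prod_mk
          (f := fun m (kv : String × Int) => if kv.2 < m then kv.2 else m)
          (g := fun m (kv : String × Int) => if kv.2 > m then kv.2 else m)]
      simp [pvM, pvX]
    simp only [min_max_kv, min_max_kv_alt, List.map_cons, List.head?_cons, hfold1]
    rw [foldl_bStep_split, mInv, xInv]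
    rw [PySem.List.foldl_prod_mk
        (f := fun acc (kv : String × Int) =>
          if kv.2 = pvM rest kv0.2 then acc ++ [kv] else acc)
        (g := fun acc (kv : String × Int) =>
          if kv.2 = pvX rest kv0.2 then acc ++ [kv] else acc)]
    rw [PySem.List.foldl_append_ite_eq_filter, PySem.List.foldl_append_ite_eq_filter]
    simp only [List.filter_cons, List.nil_append]
    rw [Prod.mk.injEq]
    constructor
    · by_cases he : pvM rest kv0.2 = kv0.2
      · simp [he]
      · simp [he, Ne.symm he]
    · by_cases he : pvX rest kv0.2 = kv0.2
      · simp [he]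
      · simp [he, Ne.symm he]
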